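-- pv_equiv track=rewrite | github.com/CASOS-IDeaS-CMU/ICJ | plot_judge_timeline.py | separate_tenures
-- ===== SOURCE A (Python) =====
-- def separate_tenures(year_votes, missing_years):
--   tenures = []
--   if (len(year_votes) > 1):
--     years = list(sorted(year_votes.keys()))
--     tenure = {years[0]: year_votes[years[0]]}
--     for prev_year, curr_year in zip(years[:-1], years[1:]):
--       if (all((y in missing_years) for y in range(prev_year + 1, curr_year))):
--         tenure[curr_year] = year_votes[curr_year]
--       else:
--         tenures.append(tenure)
--         tenure = {curr_year: year_votes[curr_year]}
--     tenures.append(tenure)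
--   else:
--     tenures.append(year_votes)
--   return tenures
-- ===== SOURCE B (Python) =====
-- def separate_tenures(year_votes, missing_years):
--     if len(year_votes) <= 1:
--         return [year_votes]
--     years = sorted(year_votes)
--     miss = sorted(set(missing_years))
--     n = len(miss)
--     groups = []
--     cur = [years[0]]
--     j = 0
--     for prev, curr in zip(years, years[1:]):
--         # advance past missing years <= prev, then count missing years < curr
--         while j < n and miss[j] <= prev:
--             j += 1
--         k = j
--         while k < n and miss[k] < curr:
--             k += 1
--         if k - j == curr - prev - 1:
--             cur.append(curr)
--         else:
--             groups.append(cur)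
--             cur = [curr]
--         j = k
--     groups.append(cur)
--     return [{y: year_votes[y] for y in g} for g in groups]
-- ===== Notes on version B (the rewrite author's own statement) =====
-- stated objective: alternative
-- what changed: A tests every single year in each gap against the missing set; B sorts the distinct missing years once and decides each gap with one two-pointer pass over that sorted list, comparing the count of missing years inside the gap with the gap length (no per-year scan of the gap).
import Mathlib
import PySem

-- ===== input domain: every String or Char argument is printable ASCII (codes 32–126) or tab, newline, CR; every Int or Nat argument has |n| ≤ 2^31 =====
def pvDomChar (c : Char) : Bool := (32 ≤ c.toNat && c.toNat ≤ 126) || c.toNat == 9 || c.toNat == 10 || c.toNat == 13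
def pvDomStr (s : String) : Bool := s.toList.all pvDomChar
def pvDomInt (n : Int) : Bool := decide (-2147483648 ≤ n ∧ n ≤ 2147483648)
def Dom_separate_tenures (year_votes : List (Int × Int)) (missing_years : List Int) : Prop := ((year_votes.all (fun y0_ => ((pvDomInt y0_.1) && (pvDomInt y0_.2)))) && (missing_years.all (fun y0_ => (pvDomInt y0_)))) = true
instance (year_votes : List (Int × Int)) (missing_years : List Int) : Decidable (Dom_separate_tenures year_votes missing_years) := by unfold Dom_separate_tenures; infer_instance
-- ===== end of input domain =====

-- B replaces A's per-gap scan of every year in range(prev+1, curr) by one sorted pass over the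
-- distinct missing years (two-pointer / count comparison); objective: alternative algorithm.

-- ===== PORT A =====
-- A's gap test: all(y in missing_years for y in range(prev_year + 1, curr_year))
def condA (missing_years : List Int) (prev curr : Int) : Bool :=
  (PySem.List.pyRange (prev + 1) curr 1).all (fun y => decide (y ∈ missing_years))

-- Port of A. The Python dict year_votes is PySem.Dict.ofList year_votes; years[:-1]/years[1:] are
-- dropLast / drop 1; year_votes[y] for y a key of the dict is getD (exact: the key is present).
def bodyA (d : PySem.Dict Int Int) (missing_years : List Int) : List Int → List (List (Int × Int))
  | [] => []  -- unreachable: only called when d.size > 1, so the sorted key list is nonempty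
  | y0 :: tl =>
    let st := (((y0 :: tl).dropLast).zip ((y0 :: tl).drop 1)).foldl
      (fun (st : List (PySem.Dict Int Int) × PySem.Dict Int Int) pc =>
        if condA missing_years pc.1 pc.2 then
          (st.1, st.2.insert pc.2 (d.getD pc.2 0))
        else
          (st.1 ++ [st.2], PySem.Dict.empty.insert pc.2 (d.getD pc.2 0)))
      ([], PySem.Dict.empty.insert y0 (d.getD y0 0))
    (st.1 ++ [st.2]).map PySem.Dict.items

def separate_tenures (year_votes : List (Int × Int)) (missing_years : List Int) : List (List (Int × Int)) :=
  if 1 < (PySem.Dict.ofList year_votes).size then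
    bodyA (PySem.Dict.ofList year_votes) missing_years
      (PySem.List.sorted (PySem.Dict.ofList year_votes).keys (fun x => x) false)
  else
    [(PySem.Dict.ofList year_votes).items]

-- ===== PORT B =====
-- Port of B (Source B). sorted(set(missing_years)) is sorted (Set.ofList ...). The integer pointer j
-- into miss is ported as the suffix miss[j:]: the two while loops are dropWhile / takeWhile on
-- that suffix and k - j is the takeWhile length (exact: miss is scanned left to right).
-- The dict comprehension {y: year_votes[y] for y in g} is the foldl of inserts over g.
def bodyB (d : PySem.Dict Int Int) (miss : List Int) : List Int → List (List (Int × Int))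
  | [] => []  -- unreachable: only called when d.size > 1, so the sorted key list is nonempty
  | y0 :: tl =>
    let st := ((y0 :: tl).zip ((y0 :: tl).drop 1)).foldl
      (fun (st : List (List Int) × List Int × List Int) pc =>
        let ms1 := st.2.2.dropWhile (fun m => decide (m ≤ pc.1))
        let gap := ms1.takeWhile (fun m => decide (m < pc.2))
        let rest := ms1.drop gap.length
        if (gap.length : Int) = pc.2 - pc.1 - 1 then
          (st.1, st.2.1 ++ [pc.2], rest)
        else
          (st.1 ++ [st.2.1], [pc.2], rest))
      ([], [y0], miss)
    (st.1 ++ [st.2.1]).map (fun g =>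
      (g.foldl (fun t y => t.insert y (d.getD y 0)) PySem.Dict.empty).items)

def separate_tenures_alt (year_votes : List (Int × Int)) (missing_years : List Int) : List (List (Int × Int)) :=
  if (PySem.Dict.ofList year_votes).size ≤ 1 then
    [(PySem.Dict.ofList year_votes).items]
  else
    bodyB (PySem.Dict.ofList year_votes)
      (PySem.List.sorted (PySem.Set.ofList missing_years) (fun x => x) false)
      (PySem.List.sorted (PySem.Dict.ofList year_votes).keys (fun x => x) false)

-- ===== PRECONDITION & SPEC =====
def Spec_separate_tenures (year_votes : List (Int × Int)) (missing_years : List Int) (out : List (List (Int × Int))) : Prop := out = separate_tenures_alt year_votes missing_years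
instance (year_votes : List (Int × Int)) (missing_years : List Int) (out : List (List (Int × Int))) : Decidable (Spec_separate_tenures year_votes missing_years out) := by unfold Spec_separate_tenures; infer_instance

-- ===== CLAIM (what is proved, stated in full; the proofs are below) =====
def Claim_equal_separate_tenures : Prop := ∀ (year_votes : List (Int × Int)) (missing_years : List Int), Dom_separate_tenures year_votes missing_years → Spec_separate_tenures year_votes missing_years (separate_tenures year_votes missing_years)

-- ===== LEMMAS AND PROOFS =====

-- adjacent pairs of (a :: l)
def pvAdj (a : Int) : List Int → List (Int × Int)
  | [] => []
  | b :: t => (a, b) :: pvAdj b t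

theorem pvAdj_eq_zip_dropLast : ∀ (l : List Int) (a : Int),
    ((a :: l).dropLast).zip ((a :: l).drop 1) = pvAdj a l := by
  intro l
  induction l with
  | nil => intro a; rfl
  | cons b t ih => intro a; simp only [pvAdj, ← ih b]; rfl

theorem pvAdj_eq_zip_self : ∀ (l : List Int) (a : Int),
    (a :: l).zip ((a :: l).drop 1) = pvAdj a l := by
  intro l
  induction l with
  | nil => intro a; rfl
  | cons b t ih => intro a; simp only [pvAdj, ← ih b]; rfl

-- a foldl over adjacent pairs is a recursion carrying the previous element
def pvGoF {σ : Type} (f : σ → Int × Int → σ) (s : σ) (a : Int) : List Int → σ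
  | [] => s
  | c :: t => pvGoF f (f s (a, c)) c t

theorem foldl_pvAdj {σ : Type} (f : σ → Int × Int → σ) : ∀ (l : List Int) (a : Int) (s : σ),
    (pvAdj a l).foldl f s = pvGoF f s a l := by
  intro l
  induction l with
  | nil => intro a s; rfl
  | cons c t ih => intro a s; simp only [pvAdj, List.foldl_cons, pvGoF, ih]

-- the common grouping skeleton: groups of years, split where P prev curr fails
def pvRuns (P : Int → Int → Bool) (st : List (List Int) × List Int) (prev : Int) :
    List Int → List (List Int) × List Int
  | [] => st
  | c :: t => pvRuns P (if P prev c then (st.1, st.2 ++ [c]) else (st.1 ++ [st.2], [c])) c t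

def pvDictOf (d : PySem.Dict Int Int) (g : List Int) : PySem.Dict Int Int :=
  g.foldl (fun t y => t.insert y (d.getD y 0)) PySem.Dict.empty

-- A's fold computes pvRuns with condA, with every group held as its dict
theorem pvGoA_eq (d : PySem.Dict Int Int) (missing_years : List Int) :
    ∀ (l : List Int) (prev : Int) (done : List (List Int)) (cur : List Int),
    pvGoF (fun (st : List (PySem.Dict Int Int) × PySem.Dict Int Int) pc =>
        if condA missing_years pc.1 pc.2 then
          (st.1, st.2.insert pc.2 (d.getD pc.2 0))
        else
          (st.1 ++ [st.2], PySem.Dict.empty.insert pc.2 (d.getD pc.2 0)))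
      (done.map (pvDictOf d), pvDictOf d cur) prev l =
    ((pvRuns (condA missing_years) (done, cur) prev l).1.map (pvDictOf d),
      pvDictOf d (pvRuns (condA missing_years) (done, cur) prev l).2) := by
  intro l
  induction l with
  | nil => intro prev done cur; rfl
  | cons c t ih =>
    intro prev done cur
    by_cases h : condA missing_years prev c
    · have h1 : (pvDictOf d cur).insert c (d.getD c 0) = pvDictOf d (cur ++ [c]) := by
        simp [pvDictOf, List.foldl_append]
      simp only [pvGoF, pvRuns, h, if_true]
      rw [h1]
      exact ih c done (cur ++ [c])
    · have h2 : PySem.Dict.empty.insert c (d.getD c 0) = pvDictOf d [c] := rfl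
      simp only [pvGoF, pvRuns, h]
      rw [h2, show done.map (pvDictOf d) ++ [pvDictOf d cur] = (done ++ [cur]).map (pvDictOf d) by
        simp]
      exact ih c (done ++ [cur]) [c]

-- sorted-list facts: dropWhile / takeWhile of a downward-closed test are filters
theorem pv_takeWhile_eq_filter (p : Int → Bool)
    (hmono : ∀ a b : Int, a ≤ b → p b = true → p a = true) :
    ∀ (l : List Int), l.Pairwise (· ≤ ·) → l.takeWhile p = l.filter p := by
  intro l
  induction l with
  | nil => intro _; rfl
  | cons a t ih =>
    intro hp
    rcases List.pairwise_cons.mp hp with ⟨ha, ht⟩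
    by_cases h : p a = true
    · simp [h, ih ht]
    · have hall : ∀ b ∈ t, p b = false := by
        intro b hb
        by_contra hb'
        exact h (hmono a b (ha b hb) (by simpa using hb'))
      have hnil : t.filter p = [] := List.filter_eq_nil_iff.mpr (fun b hb => by simp [hall b hb])
      simp [h, hnil]
  
theorem pv_dropWhile_eq_filter (p : Int → Bool)
    (hmono : ∀ a b : Int, a ≤ b → p b = true → p a = true) :
    ∀ (l : List Int), l.Pairwise (· ≤ ·) → l.dropWhile p = l.filter (fun x => !p x) := by
  intro l
  induction l with
  | nil => intro _; rfl
  | cons a t ih =>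
    intro hp
    rcases List.pairwise_cons.mp hp with ⟨ha, ht⟩
    by_cases h : p a = true
    · simp [h, ih ht]
    · have hall : ∀ b ∈ t, p b = false := by
        intro b hb
        by_contra hb'
        exact h (hmono a b (ha b hb) (by simpa using hb'))
      have : t.filter (fun x => !p x) = t := List.filter_eq_self.mpr (fun b hb => by simp [hall b hb])
      simp [h, this]

theorem pv_drop_length_takeWhile (p : Int → Bool) (l : List Int) :
    l.drop (l.takeWhile p).length = l.dropWhile p := by
  induction l with
  | nil => rfl
  | cons a t ih =>
    by_cases h : p a = true
    · simp [h, ih]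
    · simp [h]

-- THE HEART: the count test of B equals the exhaustive range test of A
theorem pv_cond_heart (missing_years miss : List Int)
    (hlt : miss.Pairwise (· < ·)) (hmem : ∀ m : Int, m ∈ miss ↔ m ∈ missing_years)
    (prev c : Int) (hpc : prev < c) :
    ((((miss.filter (fun m => !decide (m ≤ prev))).filter (fun m => decide (m < c))).length : Int)
        = c - prev - 1)
      ↔ condA missing_years prev c = true := by
  set G := (miss.filter (fun m => !decide (m ≤ prev))).filter (fun m => decide (m < c)) with hG
  have hnd : miss.Nodup := hlt.imp (fun h => ne_of_lt h)
  have hGnd : G.Nodup := (hnd.filter _).filter _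
  have hGmem : ∀ y : Int, y ∈ G ↔ (y ∈ miss ∧ prev < y ∧ y < c) := by
    intro y
    simp only [hG, List.mem_filter]
    constructor
    · rintro ⟨⟨h1, h2⟩, h3⟩
      refine ⟨h1, by simpa using h2, by simpa using h3⟩
    · rintro ⟨h1, h2, h3⟩
      exact ⟨⟨h1, by simpa using h2⟩, by simpa using h3⟩
  have hsub : G.toFinset ⊆ Finset.Ico (prev + 1) c := by
    intro y hy
    rw [List.mem_toFinset] at hy
    rcases (hGmem y).mp hy with ⟨_, h2, h3⟩
    simp [Finset.mem_Ico]; omega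
  have hcardG : G.toFinset.card = G.length := List.toFinset_card_of_nodup hGnd
  have hcardT : (Finset.Ico (prev + 1) c).card = (c - prev - 1).toNat := by
    rw [Int.card_Ico]; congr 1; omega
  have hA : condA missing_years prev c = true ↔
      ∀ y : Int, prev + 1 ≤ y → y < c → y ∈ missing_years := by
    simp only [condA, List.all_eq_true, PySem.List.mem_pyRange_one, decide_eq_true_iff]
    constructor
    · intro h y h1 h2; exact h y ⟨h1, h2⟩
    · rintro h y ⟨h1, h2⟩; exact h y h1 h2
  constructor
  · intro hlen
    rw [hA]
    intro y h1 h2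
    have hcard : (Finset.Ico (prev + 1) c).card ≤ G.toFinset.card := by
      rw [hcardG, hcardT]; omega
    have heq : G.toFinset = Finset.Ico (prev + 1) c :=
      Finset.eq_of_subset_of_card_le hsub hcard
    have : y ∈ G.toFinset := by rw [heq]; simp [Finset.mem_Ico]; omega
    rw [List.mem_toFinset, hGmem] at this
    exact (hmem y).mp this.1
  · intro h
    rw [hA] at h
    have hsup : Finset.Ico (prev + 1) c ⊆ G.toFinset := by
      intro y hy
      rw [Finset.mem_Ico] at hy
      rw [List.mem_toFinset, hGmem]
      exact ⟨(hmem y).mpr (h y hy.1 hy.2), by omega, hy.2⟩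
    have heq : G.toFinset = Finset.Ico (prev + 1) c := Finset.Subset.antisymm hsub hsup
    have := congrArg Finset.card heq
    rw [hcardG, hcardT] at this
    omega

-- B's fold computes pvRuns with condA: the suffix state satisfies the filter invariant
theorem pvGoB_eq (missing_years miss : List Int)
    (hlt : miss.Pairwise (· < ·)) (hmem : ∀ m : Int, m ∈ miss ↔ m ∈ missing_years) :
    ∀ (l : List Int) (prev : Int) (done : List (List Int)) (cur : List Int) (ms : List Int),
    (prev :: l).Pairwise (· < ·) →
    ms.dropWhile (fun m => decide (m ≤ prev)) = miss.filter (fun m => !decide (m ≤ prev)) →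
    (pvGoF (fun (st : List (List Int) × List Int × List Int) pc =>
        let ms1 := st.2.2.dropWhile (fun m => decide (m ≤ pc.1))
        let gap := ms1.takeWhile (fun m => decide (m < pc.2))
        let rest := ms1.drop gap.length
        if (gap.length : Int) = pc.2 - pc.1 - 1 then
          (st.1, st.2.1 ++ [pc.2], rest)
        else
          (st.1 ++ [st.2.1], [pc.2], rest))
      (done, cur, ms) prev l).1 = (pvRuns (condA missing_years) (done, cur) prev l).1 ∧
    (pvGoF (fun (st : List (List Int) × List Int × List Int) pc =>
        let ms1 := st.2.2.dropWhile (fun m => decide (m ≤ pc.1))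
        let gap := ms1.takeWhile (fun m => decide (m < pc.2))
        let rest := ms1.drop gap.length
        if (gap.length : Int) = pc.2 - pc.1 - 1 then
          (st.1, st.2.1 ++ [pc.2], rest)
        else
          (st.1 ++ [st.2.1], [pc.2], rest))
      (done, cur, ms) prev l).2.1 = (pvRuns (condA missing_years) (done, cur) prev l).2 := by
  intro l
  induction l with
  | nil => intro prev done cur ms _ _; exact ⟨rfl, rfl⟩
  | cons c t ih =>
    intro prev done cur ms hp hinv
    have hpc : prev < c := (List.pairwise_cons.mp hp).1 c (List.mem_cons_self)
    have hple : miss.Pairwise (· ≤ ·) := hlt.imp (fun h => le_of_lt h)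
    -- the filter shape of the step's intermediate lists
    have hms1 : ms.dropWhile (fun m => decide (m ≤ prev)) =
        miss.filter (fun m => !decide (m ≤ prev)) := hinv
    have hgap : (miss.filter (fun m => !decide (m ≤ prev))).takeWhile (fun m => decide (m < c)) =
        (miss.filter (fun m => !decide (m ≤ prev))).filter (fun m => decide (m < c)) := by
      apply pv_takeWhile_eq_filter
      · intro a b hab hb; simp only [decide_eq_true_iff] at *; omega
      · exact hple.sublist List.filter_sublist
    have hrest : (miss.filter (fun m => !decide (m ≤ prev))).dropWhile (fun m => decide (m < c)) =
        (miss.filter (fun m => !decide (m ≤ prev))).filter (fun m => !decide (m < c)) := by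
      apply pv_dropWhile_eq_filter
      · intro a b hab hb; simp only [decide_eq_true_iff] at *; omega
      · exact hple.sublist List.filter_sublist
    -- the new suffix satisfies the invariant for the next prev = c
    have hinv' : ((miss.filter (fun m => !decide (m ≤ prev))).filter
          (fun m => !decide (m < c))).dropWhile (fun m => decide (m ≤ c)) =
        miss.filter (fun m => !decide (m ≤ c)) := by
      have hs : ((miss.filter (fun m => !decide (m ≤ prev))).filter
          (fun m => !decide (m < c))).Pairwise (· ≤ ·) :=
        (hple.sublist List.filter_sublist).sublist List.filter_sublist
      rw [pv_dropWhile_eq_filter _ (by intro a b hab hb; simp only [decide_eq_true_iff] at *; omega)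
        _ hs]
      rw [List.filter_filter, List.filter_filter]
      apply List.filter_congr
      intro m _
      rw [Bool.eq_iff_iff]
      simp only [Bool.and_eq_true, Bool.not_eq_true', decide_eq_false_iff_not]
      omega
    -- B's branch test agrees with condA
    have hcond : ((((miss.filter (fun m => !decide (m ≤ prev))).filter
          (fun m => decide (m < c))).length : Int) = c - prev - 1)
        ↔ condA missing_years prev c = true :=
      pv_cond_heart missing_years miss hlt hmem prev c hpc
    have htail : (c :: t).Pairwise (· < ·) := (List.pairwise_cons.mp hp).2
    simp only [pvGoF, pvRuns]
    rw [hms1, pv_drop_length_takeWhile, hgap, hrest]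
    by_cases h : condA missing_years prev c = true
    · rw [if_pos (hcond.mpr h), if_pos h]
      exact ih c done (cur ++ [c]) _ htail hinv'
    · rw [if_neg (fun hh => h (hcond.mp hh)), if_neg h]
      exact ih c (done ++ [cur]) [c] _ htail hinv'

-- strictly increasing years from sorted distinct keys
theorem pv_years_chain (xs : List Int) (hnd : xs.Nodup) :
    (PySem.List.sorted xs (fun x => x) false).Pairwise (· < ·) := by
  have hle : (PySem.List.sorted xs (fun x => x) false).Pairwise (· ≤ ·) := by
    simpa using PySem.List.sorted_pairwise xs (fun x => x)
  have hnd' : (PySem.List.sorted xs (fun x => x) false).Nodup :=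
    (PySem.List.sorted_perm xs (fun x => x) false).nodup_iff.mpr hnd
  exact (hle.and hnd').imp (fun h => lt_of_le_of_ne h.1 h.2)

-- ===== VERDICT (by name: the statement is the Claim_ definition above) =====
theorem separate_tenures_spec : Claim_equal_separate_tenures := by
  intro year_votes missing_years _
  unfold Spec_separate_tenures separate_tenures separate_tenures_alt
  set d := PySem.Dict.ofList year_votes with hd
  by_cases hsz : 1 < d.size
  · rw [if_pos hsz, if_neg (by omega)]
    set years := PySem.List.sorted d.keys (fun x => x) false with hyears
    set miss := PySem.List.sorted (PySem.Set.ofList missing_years) (fun x => x) false with hm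
    have hlen : years.length = d.size := by
      rw [hyears, PySem.List.length_sorted]
      simp [PySem.Dict.keys, PySem.Dict.size]
    have hmlt : miss.Pairwise (· < ·) := by
      simpa [hm] using PySem.List.sorted_ofList_pairwise_lt (xs := missing_years)
    have hmem : ∀ m : Int, m ∈ miss ↔ m ∈ missing_years := by
      intro m
      rw [hm, PySem.List.mem_sorted, PySem.Set.mem_ofList]
    have hchain : years.Pairwise (· < ·) := by
      rw [hyears]
      exact pv_years_chain d.keys (PySem.Dict.nodup_keys_ofList year_votes)
    cases hy : years with
    | nil => rw [hy] at hlen; simp at hlen; omega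
    | cons y0 rest =>
      rw [hy] at hchain
      have hinv0 : miss.dropWhile (fun m => decide (m ≤ y0)) =
          miss.filter (fun m => !decide (m ≤ y0)) := by
        apply pv_dropWhile_eq_filter
        · intro a b hab hb; simp only [decide_eq_true_iff] at *; omega
        · exact hmlt.imp (fun h => le_of_lt h)
      have hB := pvGoB_eq missing_years miss hmlt hmem rest y0 [] [y0] miss hchain hinv0
      have hA := pvGoA_eq d missing_years rest y0 [] [y0]
      simp only [List.map_nil] at hA
      simp only [bodyA, bodyB, pvAdj_eq_zip_dropLast, pvAdj_eq_zip_self, foldl_pvAdj]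
      rw [show PySem.Dict.empty.insert y0 (d.getD y0 0) = pvDictOf d [y0] from rfl, hA,
        hB.1, hB.2]
      simp [List.map_append, List.map_map, pvDictOf, Function.comp]
  · rw [if_neg hsz, if_pos (by omega)]
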